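-- pv_equiv track=rewrite | github.com/MathiasSJacobsen/julekalender | 2021/AoC/luke10.py | calculatePoiontsForFixingLines
-- ===== SOURCE A (Python) =====
-- from typing import List
--
-- def calculatePoiontsForFixingLines(list : List[str]):
--     points = {
--         '(': 1,
--         '[': 2,
--         '{': 3,
--         '<': 4,
--     }
--     p = 0
--     for char in list[::-1]:
--         p = p * 5 + points[char]
--     return p
-- ===== SOURCE B (Python) =====
-- def calculatePoiontsForFixingLines(list):
--     points = {
--         '(': 1,
--         '[': 2,
--         '{': 3,
--         '<': 4,
--     }
--     return sum(points[char] * 5**i for i, char in enumerate(list))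
-- ===== Notes on version B (the rewrite author's own statement) =====
-- stated objective: simpler
-- what changed: Replaces the reversed-list Horner accumulation loop with a direct positional-weight sum over a forward enumerate: points[char]*5**i summed over the list, no reversal and no mutable accumulator.
import Mathlib
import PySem

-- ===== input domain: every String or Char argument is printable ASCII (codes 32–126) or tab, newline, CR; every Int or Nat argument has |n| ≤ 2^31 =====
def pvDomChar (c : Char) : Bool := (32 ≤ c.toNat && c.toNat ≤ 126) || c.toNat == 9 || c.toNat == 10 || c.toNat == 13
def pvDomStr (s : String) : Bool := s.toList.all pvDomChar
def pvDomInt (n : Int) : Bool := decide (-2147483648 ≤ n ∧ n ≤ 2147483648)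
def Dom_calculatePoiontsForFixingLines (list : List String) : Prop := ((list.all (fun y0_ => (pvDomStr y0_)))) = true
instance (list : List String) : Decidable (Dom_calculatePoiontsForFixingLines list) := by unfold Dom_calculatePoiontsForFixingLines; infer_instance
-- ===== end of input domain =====

-- B replaces A's reversed-list Horner loop with a direct positional-weight sum
-- (points[char] * 5**i over a forward enumerate); same O(n) cost, simpler shape.

-- ===== PORT A =====
-- the 'points' dict literal shared by both Pythons
def pvPoints : PySem.Dict String Int :=
  ((((PySem.Dict.empty).insert "(" 1).insert "[" 2).insert "{" 3).insert "<" 4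

def calculatePoiontsForFixingLines (list : List String) : Int :=
  -- for char in list[::-1]: p = p * 5 + points[char]   (points[char] total under Pre_)
  ((PySem.List.slice? list none none (-1)).getD []).foldl
    (fun p char => p * 5 + pvPoints.getD char 0) 0

-- ===== PORT B =====
def calculatePoiontsForFixingLines_alt (list : List String) : Int :=
  -- sum(points[char] * 5**i for i, char in enumerate(list))
  (PySem.List.enumerate list 0).foldl
    (fun acc ic => acc + pvPoints.getD ic.2 0 * 5 ^ ic.1.toNat) 0

-- ===== PRECONDITION & SPEC =====
-- Pre_ excludes exactly the inputs containing a string outside the points dict,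
-- on which Python A raises KeyError.
def Pre_calculatePoiontsForFixingLines (list : List String) : Prop :=
  ∀ s ∈ list, s = "(" ∨ s = "[" ∨ s = "{" ∨ s = "<"
instance (list : List String) : Decidable (Pre_calculatePoiontsForFixingLines list) := by
  unfold Pre_calculatePoiontsForFixingLines; infer_instance

def pvWitness_calculatePoiontsForFixingLines : List String := ["(", "[", "{", "<", "("]

def Spec_calculatePoiontsForFixingLines (list : List String) (out : Int) : Prop := out = calculatePoiontsForFixingLines_alt list
instance (list : List String) (out : Int) : Decidable (Spec_calculatePoiontsForFixingLines list out) := by unfold Spec_calculatePoiontsForFixingLines; infer_instance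

-- ===== CLAIM (what is proved, stated in full; the proofs are below) =====
def Claim_equal_calculatePoiontsForFixingLines : Prop := ∀ (list : List String), Dom_calculatePoiontsForFixingLines list → Pre_calculatePoiontsForFixingLines list → Spec_calculatePoiontsForFixingLines list (calculatePoiontsForFixingLines list)

-- ===== LEMMAS AND PROOFS =====

-- A's Horner loop over the reversed list, one cons step
theorem pvHornerCons (x : String) (xs : List String) :
    (x :: xs).reverse.foldl (fun p char => p * 5 + pvPoints.getD char 0) 0
      = (xs.reverse.foldl (fun p char => p * 5 + pvPoints.getD char 0) 0) * 5
        + pvPoints.getD x 0 := by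
  simp [List.reverse_cons, List.foldl_append]

-- B's enumerate sum from any start equals acc + (A's Horner value) * 5^start
theorem pvEnumSum (xs : List String) :
    ∀ (s : Nat) (acc : Int),
      (PySem.List.enumerate xs (s : Int)).foldl
          (fun acc ic => acc + pvPoints.getD ic.2 0 * 5 ^ ic.1.toNat) acc
        = acc + (xs.reverse.foldl (fun p char => p * 5 + pvPoints.getD char 0) 0) * 5 ^ s := by
  induction xs with
  | nil => intro s acc; simp [PySem.List.enumerate_nil]
  | cons x xs ih =>
    intro s acc
    rw [PySem.List.enumerate_cons]
    have hcast : (s : Int) + 1 = ((s + 1 : Nat) : Int) := by push_cast; ring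
    simp only [List.foldl_cons, Int.toNat_natCast, hcast, ih (s + 1)]
    rw [pvHornerCons]
    ring

theorem calculatePoiontsForFixingLines_eq (list : List String) :
    calculatePoiontsForFixingLines list = calculatePoiontsForFixingLines_alt list := by
  unfold calculatePoiontsForFixingLines calculatePoiontsForFixingLines_alt
  rw [PySem.List.slice?_none_none_neg_one]
  have := pvEnumSum list 0 0
  simp at this ⊢
  omega

-- ===== VERDICT (by name: the statement is the Claim_ definition above) =====
theorem calculatePoiontsForFixingLines_spec : Claim_equal_calculatePoiontsForFixingLines := by
  intro list _ _
  exact calculatePoiontsForFixingLines_eq list
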